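-- pv_equiv track=rewrite | github.com/memius/market-analyzer | remove_path.py | remove_path
-- ===== SOURCE A (Python) =====
-- def remove_path(s):
--     while 1:
--         if s.find("/") == -1:
--             break
--         else:
--             i = s.find("/") +1
--             s = s[i:]
--     return s
-- ===== SOURCE B (Python) =====
-- def remove_path(s):
--     for i in range(len(s) - 1, -1, -1):
--         if s[i] == '/':
--             return s[i + 1:]
--     return s
-- ===== Notes on version B (the rewrite author's own statement) =====
-- stated objective: alternative
-- what changed: Replaces A's repeated find-then-chop forward passes (each chop copying the remaining suffix) with a single backward character scan that locates the last slash and slices once; the explicit Python char loop trades A's C-level find speed for a one-pass algorithm.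
import Mathlib
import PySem

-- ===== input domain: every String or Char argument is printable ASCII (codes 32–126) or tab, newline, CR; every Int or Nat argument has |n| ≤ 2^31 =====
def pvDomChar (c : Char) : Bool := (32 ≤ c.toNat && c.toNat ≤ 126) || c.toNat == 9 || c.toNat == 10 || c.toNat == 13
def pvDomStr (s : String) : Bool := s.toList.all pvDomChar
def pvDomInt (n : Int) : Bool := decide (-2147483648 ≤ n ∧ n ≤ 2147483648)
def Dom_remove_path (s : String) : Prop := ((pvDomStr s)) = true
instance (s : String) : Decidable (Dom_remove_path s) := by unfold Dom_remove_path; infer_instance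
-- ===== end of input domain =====

-- B scans once from the end for the last slash instead of A's repeated find-then-chop passes; return values proved equal on all strings.

-- ===== PORT A =====
-- A's while loop: while s contains '/', set s = s[find('/')+1:].  Exact over List Char:
-- s.find("/") → List.findIdx? (· = '/'), the slice s[i+1:] (0 ≤ i+1 ≤ len) → List.drop (i+1).
def removePathLoopA (l : List Char) : List Char :=
  match h : l.findIdx? (· = '/') with
  | none => l
  | some i => removePathLoopA (l.drop (i + 1))
termination_by l.length
decreasing_by
  have hne : l ≠ [] := by intro he; subst he; rw [List.findIdx?_nil] at h; cases h
  have : 0 < l.length := List.length_pos_iff.mpr hne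
  simp [List.length_drop]; omega

def remove_path (s : String) : String := String.ofList (removePathLoopA s.toList)

-- ===== PORT B =====
-- B's backward loop: i from len-1 down to 0; first '/' found returns the chars
-- collected after it (s[i+1:]); if the scan ends without a slash, return s.
-- Ported as a recursion over the reversed character list with the collected suffix as accumulator.
def removePathScanB : List Char → List Char → Option (List Char)
  | [], _ => none
  | c :: rest, acc => if c = '/' then some acc else removePathScanB rest (c :: acc)

def remove_path_alt (s : String) : String :=
  match removePathScanB s.toList.reverse [] with
  | some t => String.ofList t
  | none => s

-- ===== PRECONDITION & SPEC =====
def Spec_remove_path (s : String) (out : String) : Prop := out = remove_path_alt s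
instance (s : String) (out : String) : Decidable (Spec_remove_path s out) := by unfold Spec_remove_path; infer_instance

-- ===== CLAIM (what is proved, stated in full; the proofs are below) =====
def Claim_equal_remove_path : Prop := ∀ (s : String), Dom_remove_path s → Spec_remove_path s (remove_path s)

-- ===== LEMMAS AND PROOFS =====

-- the common value: the (reversed) longest slash-free suffix
def pvSpec (l : List Char) : List Char := (l.reverse.takeWhile (· ≠ '/')).reverse

theorem takeWhile_append_slash (as bs : List Char) :
    List.takeWhile (· ≠ '/') (as ++ '/' :: bs) = List.takeWhile (· ≠ '/') as := by
  induction as with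
  | nil => simp [List.takeWhile]
  | cons c cs ih =>
      by_cases hc : c = '/'
      · subst hc; simp [List.takeWhile]
      · simp only [List.cons_append, List.takeWhile_cons, ne_eq, hc, decide_false,
          Bool.not_false, if_true, decide_not]
        simp only [ne_eq, decide_not] at ih
        rw [ih]

theorem pvSpec_no_slash {l : List Char} (h : ¬ '/' ∈ l) : pvSpec l = l := by
  unfold pvSpec
  rw [List.takeWhile_eq_self_iff.mpr, List.reverse_reverse]
  intro c hc
  have : c ∈ l := List.mem_reverse.mp hc
  simp only [decide_eq_true_iff]
  intro he; exact h (he ▸ this)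

theorem loopA_eq_pvSpec (l : List Char) : removePathLoopA l = pvSpec l := by
  induction l using (measure List.length).wf.induction with
  | _ l ih =>
  rw [removePathLoopA]
  split
  · next h =>
      have hns : ¬ '/' ∈ l := by
        intro hm
        rcases List.findIdx?_eq_none_iff.mp h '/' hm with hc
        simp at hc
      exact (pvSpec_no_slash hns).symm
  · next i h =>
      have hi : i < l.length := (List.findIdx?_eq_some_iff_findIdx_eq.mp h).1
      have hget : l[i] = '/' := by
        have := List.findIdx?_eq_some_iff_getElem.mp h
        rcases this with ⟨_, hp, _⟩
        simpa using hp
      have hlen : (l.drop (i + 1)).length < l.length := by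
        simp [List.length_drop]; omega
      rw [ih _ hlen]
      -- pvSpec (l.drop (i+1)) = pvSpec l
      have hdecomp : l = l.take i ++ '/' :: l.drop (i + 1) := by
        conv_lhs => rw [← List.take_append_drop (i + 1) l]
        rw [List.take_add_one, List.getElem?_eq_getElem hi]
        simp [hget]
      unfold pvSpec
      congr 1
      conv_rhs => rw [hdecomp]
      rw [List.reverse_append, List.reverse_cons, List.append_assoc]
      exact (takeWhile_append_slash _ _).symm

theorem scanB_eq : ∀ (rev acc : List Char),
    removePathScanB rev acc =
      if '/' ∈ rev then some ((rev.takeWhile (· ≠ '/')).reverse ++ acc) else none := by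
  intro rev
  induction rev with
  | nil => intro acc; simp [removePathScanB]
  | cons c rest ih =>
      intro acc
      by_cases hc : c = '/'
      · subst hc; simp [removePathScanB, List.takeWhile]
      · by_cases hm : '/' ∈ rest
        · simp [removePathScanB, hc, ih, hm, List.mem_cons]
        · simp [removePathScanB, hc, ih, hm, List.mem_cons]
          exact fun h => hc h.symm

-- ===== VERDICT (by name: the statement is the Claim_ definition above) =====
theorem remove_path_spec : Claim_equal_remove_path := by
  intro s _
  show remove_path s = remove_path_alt s
  unfold remove_path remove_path_alt
  rw [loopA_eq_pvSpec, scanB_eq]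
  by_cases hm : '/' ∈ s.toList.reverse
  · simp [hm, pvSpec]
  · have hns : ¬ '/' ∈ s.toList := fun h => hm (List.mem_reverse.mpr h)
    simp only [hm, reduceIte]
    rw [pvSpec_no_slash hns]
    exact String.ofList_toList
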